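-- pv_equiv track=rewrite | github.com/tail-event/advent-of-code | aoc2023/aoc_py/aoc1/aoc12.py | find_matching_digits
-- ===== SOURCE A (Python) =====
-- import string
-- from typing import Optional
--
-- num_mapping = {
--     "one": 1,
--     "two": 2,
--     "three": 3,
--     "four": 4,
--     "five": 5,
--     "six": 6,
--     "seven": 7,
--     "eight": 8,
--     "nine": 9,
-- }
--
-- num_reverse_mapping = {"".join(reversed(k)): v for k, v in num_mapping.items()}
--
-- def find_matching_digits(s: str, i: int, reverse: bool) -> Optional[int]:
--     """Find first matching digit in string.
--
--     Find first matching digit in string starting from a given index.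
--     This function can identify digits that are spelled out with letters.
--
--     Examples:
--         >>> find_matching_digits("xtwone3four", 0, reverse=False)
--         None
--         >>> find_matching_digits("xtwone3four", 1, reverse=False)
--         2
--         >>> find_matching_digits("xtwone3four", 10, reverse=True)
--         4
--
--     Args:
--         s (str): the string.
--         i (int): the starting index.
--         reverse (bool): whether to find a match from right to left.
--
--     Returns:
--         Optional[int]: matching digit, if found.
--     """
--     if s[i] in string.digits:
--         return int(s[i])
--
--     mapping = num_reverse_mapping if reverse else num_mapping
--     matching = list(mapping.keys())
--     matching_idx = 0
--     while True:
--         new_matching = []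
--         for num_s in matching:
--             if matching_idx < len(num_s):
--                 if num_s[matching_idx] == s[i + matching_idx * (-1 if reverse else 1)]:
--                     if len(num_s) - 1 == matching_idx:
--                         return mapping[num_s]
--                     new_matching.append(num_s)
--
--         matching = new_matching
--         matching_idx += 1
--         if not matching:
--             return None
-- ===== SOURCE B (Python) =====
-- import string
--
-- num_mapping = {
--     "one": 1, "two": 2, "three": 3, "four": 4, "five": 5,
--     "six": 6, "seven": 7, "eight": 8, "nine": 9,
-- }
-- num_reverse_mapping = {"".join(reversed(k)): v for k, v in num_mapping.items()}
--
--
-- def find_matching_digits(s, i, reverse):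
--     if s[i] in string.digits:
--         return int(s[i])
--     step = -1 if reverse else 1
--     mapping = num_reverse_mapping if reverse else num_mapping
--     for word, value in mapping.items():
--         if all(word[k] == s[i + k * step] for k in range(len(word))):
--             return value
--     return None
-- ===== Notes on version B (the rewrite author's own statement) =====
-- stated objective: idiomatic
-- what changed: A prunes a breadth-first list of all still-matching spelled-out words level by level inside a while-loop; B simply iterates over the mapping once and tests each word character-by-character with a short-circuiting all(), using the same index expression so exceptions and wraparound are preserved.
import Mathlib
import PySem

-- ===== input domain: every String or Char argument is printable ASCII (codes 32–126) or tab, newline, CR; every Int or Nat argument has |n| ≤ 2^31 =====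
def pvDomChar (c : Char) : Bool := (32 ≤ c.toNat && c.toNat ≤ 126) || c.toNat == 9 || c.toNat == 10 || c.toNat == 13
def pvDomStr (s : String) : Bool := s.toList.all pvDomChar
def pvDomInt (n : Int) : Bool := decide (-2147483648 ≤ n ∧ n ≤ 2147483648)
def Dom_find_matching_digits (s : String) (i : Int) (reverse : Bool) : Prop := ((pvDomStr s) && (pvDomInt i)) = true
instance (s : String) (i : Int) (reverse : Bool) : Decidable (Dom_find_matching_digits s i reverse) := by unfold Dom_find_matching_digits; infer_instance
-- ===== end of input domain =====

-- B replaces A's breadth-first candidate-pruning while-loop by a plain per-word scan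
-- (for each spelled word, compare character by character with the same index expression);
-- equivalence is about return values (on inputs excluded by Pre_ the Python A raises
-- IndexError; both ports return none there).

-- string.digits
def pvDigits : List Char := ['0','1','2','3','4','5','6','7','8','9']

-- num_mapping, as an association list in insertion order (keys as char lists)
def pvNumMapping : List (List Char × Int) :=
  [(['o','n','e'], 1), (['t','w','o'], 2), (['t','h','r','e','e'], 3),
   (['f','o','u','r'], 4), (['f','i','v','e'], 5), (['s','i','x'], 6),
   (['s','e','v','e','n'], 7), (['e','i','g','h','t'], 8), (['n','i','n','e'], 9)]

-- num_reverse_mapping = {reversed key: v}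
def pvNumReverseMapping : List (List Char × Int) := pvNumMapping.map (fun p => (p.1.reverse, p.2))

-- ===== PORT A =====
-- the inner `for num_s in matching` loop of one while-iteration:
-- get k = s[i + k*(-1 if reverse else 1)] (none = IndexError, only outside Pre_);
-- result: .inl r = a `return r` happened (r = none encodes the IndexError), .inr new_matching = fall through
def pvRoundA (get : Nat → Option Char) (mapping : List (List Char × Int))
    (idx : Nat) : List (List Char) → (Option Int) ⊕ (List (List Char))
  | [] => .inr []
  | w :: rest =>
    if idx < w.length then
      match get idx with
      | none => .inl none  -- IndexError in Python (outside Pre_)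
      | some c =>
        if w.getD idx ' ' = c then
          if w.length - 1 = idx then .inl (some ((List.lookup w mapping).getD 0))
          else
            match pvRoundA get mapping idx rest with
            | .inl r => .inl r
            | .inr ws => .inr (w :: ws)
        else pvRoundA get mapping idx rest
    else pvRoundA get mapping idx rest

-- the `while True` loop; every key has length ≤ 5, so by matching_idx = 5 all
-- candidates are pruned and the loop has returned: fuel 6 is never exhausted
def pvLoopA (get : Nat → Option Char) (mapping : List (List Char × Int)) :
    Nat → List (List Char) → Nat → Option Int
  | 0, _, _ => none
  | fuel + 1, matching, idx =>
    match pvRoundA get mapping idx matching with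
    | .inl r => r
    | .inr newMatching =>
      if newMatching.isEmpty then none
      else pvLoopA get mapping fuel newMatching (idx + 1)

def find_matching_digits (s : String) (i : Int) (reverse : Bool) : Option Int :=
  match PySem.Str.pyGet? s i with
  | none => none  -- s[i] raises IndexError (outside Pre_)
  | some c =>
    if pvDigits.contains c then some ((c.toNat : Int) - 48)  -- int(s[i])
    else
      let mapping := if reverse then pvNumReverseMapping else pvNumMapping
      pvLoopA (fun k => PySem.Str.pyGet? s (i + (k : Int) * (if reverse then -1 else 1)))
        mapping 6 (mapping.map Prod.fst) 0

-- ===== PORT B =====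
-- all(word[k] == s[i + k*step] for k in range(len(word))), short-circuiting;
-- none encodes the IndexError raised when the generator indexes out of range
def pvMatchB (get : Nat → Option Char) : List Char → Nat → Option Bool
  | [], _ => some true
  | c :: cs, k =>
    match get k with
    | none => none  -- IndexError in Python (outside Pre_)
    | some sc => if c = sc then pvMatchB get cs (k + 1) else some false

-- for word, value in mapping.items(): if all(...): return value
def pvScanB (get : Nat → Option Char) : List (List Char × Int) → Option Int
  | [] => none
  | (w, v) :: rest =>
    match pvMatchB get w 0 with
    | none => none  -- IndexError propagates (outside Pre_)
    | some true => some v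
    | some false => pvScanB get rest

def find_matching_digits_alt (s : String) (i : Int) (reverse : Bool) : Option Int :=
  match PySem.Str.pyGet? s i with
  | none => none  -- s[i] raises IndexError (outside Pre_)
  | some c =>
    if pvDigits.contains c then some ((c.toNat : Int) - 48)
    else
      let mapping := if reverse then pvNumReverseMapping else pvNumMapping
      pvScanB (fun k => PySem.Str.pyGet? s (i + (k : Int) * (if reverse then -1 else 1)))
        mapping

-- ===== PRECONDITION & SPEC =====
-- Pre_ excludes exactly the inputs on which Python A raises IndexError: i out of range
-- for s[i], or (non-digit s[i]) some spelled word matching s at its first k probed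
-- positions while position k's index i + k*step is out of range.
def Pre_find_matching_digits (s : String) (i : Int) (reverse : Bool) : Prop :=
  PySem.Str.pyGet? s i ≠ none ∧
  (pvDigits.contains ((PySem.Str.pyGet? s i).getD '0') = false →
    ∀ p ∈ (if reverse then pvNumReverseMapping else pvNumMapping), ∀ k < p.1.length,
      (∀ j < k, PySem.Str.pyGet? s (i + (j : Int) * (if reverse then -1 else 1)) =
        some (p.1.getD j ' ')) →
      PySem.Str.pyGet? s (i + (k : Int) * (if reverse then -1 else 1)) ≠ none)

instance (s : String) (i : Int) (reverse : Bool) : Decidable (Pre_find_matching_digits s i reverse) := by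
  unfold Pre_find_matching_digits; infer_instance

def pvWitness_find_matching_digits : String × Int × Bool := ("a5", 1, false)

def Spec_find_matching_digits (s : String) (i : Int) (reverse : Bool) (out : Option Int) : Prop := out = find_matching_digits_alt s i reverse
instance (s : String) (i : Int) (reverse : Bool) (out : Option Int) : Decidable (Spec_find_matching_digits s i reverse out) := by unfold Spec_find_matching_digits; infer_instance

-- ===== CLAIM (what is proved, stated in full; the proofs are below) =====
def Claim_equal_find_matching_digits : Prop := ∀ (s : String) (i : Int) (reverse : Bool), Dom_find_matching_digits s i reverse → Pre_find_matching_digits s i reverse → Spec_find_matching_digits s i reverse (find_matching_digits s i reverse)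

-- ===== LEMMAS AND PROOFS =====

-- w agrees with the probed characters at positions 0..k-1
def pvAgree (get : Nat → Option Char) (w : List Char) (k : Nat) : Prop :=
  ∀ j < k, get j = some (w.getD j ' ')

-- the Bool test "w is still a candidate at round idx" (A's loop invariant)
def pvSurvB (get : Nat → Option Char) (idx : Nat) (w : List Char) : Bool :=
  decide (idx < w.length) && (List.range idx).all (fun j => get j == some (w.getD j ' '))

theorem pvSurvB_iff (get : Nat → Option Char) (idx : Nat) (w : List Char) :
    pvSurvB get idx w = true ↔ idx < w.length ∧ pvAgree get w idx := by
  simp [pvSurvB, pvAgree, List.all_eq_true, List.mem_range]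

theorem pvMatchB_true_iff (get : Nat → Option Char) (u : List Char) (k0 : Nat) :
    pvMatchB get u k0 = some true ↔ ∀ j < u.length, get (k0 + j) = some (u.getD j ' ') := by
  induction u generalizing k0 with
  | nil => simp [pvMatchB]
  | cons c cs ih =>
    rw [pvMatchB]
    cases hg : get k0 with
    | none =>
      constructor
      · intro h; exact absurd h (by simp)
      · intro h
        have := h 0 (by simp)
        simp [hg] at this
    | some sc =>
      simp only []
      by_cases hc : c = sc
      · rw [if_pos hc, ih (k0 + 1)]
        constructor
        · intro h j hj
          cases j with
          | zero => simp only [Nat.add_zero, List.getD_cons_zero, hg, hc]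
          | succ j =>
            rw [List.getD_cons_succ, show k0 + (j + 1) = k0 + 1 + j by omega]
            exact h j (by simpa using hj)
        · intro h j hj
          have := h (j + 1) (by simpa using Nat.succ_lt_succ hj)
          rwa [List.getD_cons_succ, show k0 + (j + 1) = k0 + 1 + j by omega] at this
      · rw [if_neg hc]
        constructor
        · intro h; exact absurd h (by simp)
        · intro h
          exfalso
          have := h 0 (by simp)
          simp only [Nat.add_zero, List.getD_cons_zero] at this
          rw [hg] at this
          injection this with h'
          exact hc h'.symm

theorem pvMatchB_none_exists (get : Nat → Option Char) (u : List Char) (k0 : Nat)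
    (h : pvMatchB get u k0 = none) :
    ∃ k < u.length, get (k0 + k) = none ∧ ∀ j < k, get (k0 + j) = some (u.getD j ' ') := by
  induction u generalizing k0 with
  | nil => simp [pvMatchB] at h
  | cons c cs ih =>
    rw [pvMatchB] at h
    cases hg : get k0 with
    | none =>
      exact ⟨0, by simp, by simpa using hg, by intro j hj; omega⟩
    | some sc =>
      rw [hg] at h
      simp only [] at h
      by_cases hc : c = sc
      · rw [if_pos hc] at h
        obtain ⟨k, hk, hnone, hagree⟩ := ih (k0 + 1) h
        refine ⟨k + 1, by simpa using Nat.succ_lt_succ hk, ?_, ?_⟩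
        · rwa [show k0 + (k + 1) = k0 + 1 + k by omega]
        · intro j hj
          cases j with
          | zero => simp only [Nat.add_zero, List.getD_cons_zero, hg, hc]
          | succ j =>
            have := hagree j (by omega)
            rwa [List.getD_cons_succ, show k0 + (j + 1) = k0 + 1 + j by omega]
      · rw [if_neg hc] at h; simp at h

-- if w1 agrees with the probes wherever w2 is fully probed, w2 is a prefix of w1
theorem pvPrefix_of_agree (get : Nat → Option Char) (w1 w2 : List Char)
    (h1 : ∀ j < w1.length, get j = some (w1.getD j ' '))
    (h2 : ∀ j < w1.length, get j = some (w2.getD j ' '))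
    (hle : w1.length ≤ w2.length) : w1 <+: w2 := by
  rw [List.prefix_iff_eq_take]
  apply List.ext_getElem (by simp [hle])
  intro n hn1 hn2
  have e1 := h1 n hn1
  have e2 := h2 n hn1
  rw [e1] at e2
  have h3 : w1.getD n ' ' = w2.getD n ' ' := by injection e2
  rw [List.getD_eq_getElem _ _ hn1, List.getD_eq_getElem _ _ (by omega)] at h3
  rw [List.getElem_take]
  exact h3

-- B hits an IndexError on w1 while w2 fully matches only if w2 is a prefix of w1
theorem pvNoneFull (get : Nat → Option Char) (w1 w2 : List Char)
    (hn : pvMatchB get w1 0 = none) (hf : pvMatchB get w2 0 = some true) : w2 <+: w1 := by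
  obtain ⟨k, hk, hknone, hagree⟩ := pvMatchB_none_exists get w1 0 hn
  have h2 := (pvMatchB_true_iff get w2 0).1 hf
  have hlen : w2.length ≤ k := by
    by_contra hcon
    push_neg at hcon
    have h3 := h2 k hcon
    rw [Nat.zero_add] at h3
    rw [Nat.zero_add] at hknone
    rw [h3] at hknone
    cases hknone
  exact pvPrefix_of_agree get w2 w1
    (fun j hj => by simpa using h2 j hj)
    (fun j hj => by simpa using hagree j (by omega))
    (by omega)

theorem pvPairUniq (M : List (List Char × Int)) (hnd : (M.map Prod.fst).Nodup)
    (p q : List Char × Int) (hp : p ∈ M) (hq : q ∈ M) (hk : p.1 = q.1) : p = q := by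
  induction M with
  | nil => cases hp
  | cons r t ih =>
    simp only [List.map_cons, List.nodup_cons] at hnd
    rcases List.mem_cons.1 hp with hp | hp <;> rcases List.mem_cons.1 hq with hq | hq
    · rw [hp, hq]
    · exact absurd (List.mem_map.2 ⟨q, hq, by rw [← hk, hp]⟩) hnd.1
    · exact absurd (List.mem_map.2 ⟨p, hp, by rw [hk, hq]⟩) hnd.1
    · exact ih hnd.2 hp hq

theorem pvLookupEq (M : List (List Char × Int)) (hnd : (M.map Prod.fst).Nodup)
    (a : List Char) (b : Int) (h : (a, b) ∈ M) : List.lookup a M = some b := by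
  induction M with
  | nil => cases h
  | cons r t ih =>
    obtain ⟨x, y⟩ := r
    simp only [List.map_cons, List.nodup_cons] at hnd
    rcases List.mem_cons.1 h with h | h
    · injection h with h1 h2
      simp [List.lookup, ← h1, ← h2]
    · have hax : ¬(a == x) = true := by
        intro hax
        have : a = x := by simpa using hax
        exact hnd.1 (List.mem_map.2 ⟨(a, b), h, by simp [this]⟩)
      simp only [List.lookup, Bool.not_eq_true] at hax ⊢
      rw [hax]
      exact ih hnd.2 h

-- B returns None when no word fully matches (IndexError is encoded as none on both sides)
theorem pvScanB_none (get : Nat → Option Char) (M : List (List Char × Int))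
    (h : ∀ p ∈ M, pvMatchB get p.1 0 ≠ some true) : pvScanB get M = none := by
  induction M with
  | nil => rfl
  | cons p t ih =>
    obtain ⟨w, v⟩ := p
    rw [pvScanB]
    cases hm : pvMatchB get w 0 with
    | none => rfl
    | some b =>
      cases b
      · exact ih fun q hq => h q (List.mem_cons_of_mem _ hq)
      · exact absurd hm (h (w, v) List.mem_cons_self)

-- B returns the value of the unique fully matching word
theorem pvScanB_full (get : Nat → Option Char) (M : List (List Char × Int))
    (ws : List Char) (vs : Int) (hnd : (M.map Prod.fst).Nodup)
    (hnp : ∀ p ∈ M, ∀ q ∈ M, p.1 <+: q.1 → p.1 = q.1)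
    (hmem : (ws, vs) ∈ M) (hfull : pvMatchB get ws 0 = some true)
    (huniq : ∀ p ∈ M, pvMatchB get p.1 0 = some true → p.1 = ws) :
    pvScanB get M = some vs := by
  induction M with
  | nil => cases hmem
  | cons p t ih =>
    obtain ⟨w, v⟩ := p
    rw [pvScanB]
    cases hm : pvMatchB get w 0 with
    | none =>
      exfalso
      have hpre : ws <+: w := pvNoneFull get w ws hm hfull
      have h1 : ws = w := hnp (ws, vs) hmem (w, v) List.mem_cons_self hpre
      rw [← h1] at hm
      rw [hfull] at hm
      cases hm
    | some b =>
      cases b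
      · have hne : (w, v) ≠ (ws, vs) := by
          intro he
          have h1 : w = ws := congrArg Prod.fst he
          rw [h1, hfull] at hm
          cases hm
        have hmem' : (ws, vs) ∈ t := by
          rcases List.mem_cons.1 hmem with h | h
          · exact absurd h.symm hne
          · exact h
        simp only [List.map_cons, List.nodup_cons] at hnd
        exact ih hnd.2
          (fun p hp q hq => hnp p (List.mem_cons_of_mem _ hp) q (List.mem_cons_of_mem _ hq))
          hmem'
          (fun q hq => huniq q (List.mem_cons_of_mem _ hq))
      · have hw : w = ws := huniq (w, v) List.mem_cons_self hm
        have : ((w, v) : List Char × Int) = (ws, vs) :=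
          pvPairUniq _ hnd (w, v) (ws, vs) List.mem_cons_self hmem hw
        rw [show v = ((w, v) : List Char × Int).2 from rfl, this]

-- A's inner for-loop when the probe raises IndexError
theorem pvRoundA_none (get : Nat → Option Char) (M : List (List Char × Int)) (idx : Nat)
    (m : List (List Char)) (hall : ∀ w ∈ m, idx < w.length) (hm : m ≠ [])
    (hg : get idx = none) : pvRoundA get M idx m = .inl none := by
  cases m with
  | nil => exact absurd rfl hm
  | cons w t =>
    rw [pvRoundA, if_pos (hall w List.mem_cons_self), hg]

-- A's inner for-loop when no candidate completes this round: it filters by the probed char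
theorem pvRoundA_nocomp (get : Nat → Option Char) (M : List (List Char × Int)) (idx : Nat)
    (c : Char) (hg : get idx = some c) :
    ∀ m : List (List Char), (∀ w ∈ m, idx < w.length) →
      (∀ w ∈ m, w.getD idx ' ' = c → w.length ≠ idx + 1) →
      pvRoundA get M idx m = .inr (m.filter (fun w => w.getD idx ' ' == c)) := by
  intro m
  induction m with
  | nil => intro _ _; rfl
  | cons w t ih =>
    intro hall hnc
    have hwlen := hall w List.mem_cons_self
    rw [pvRoundA, if_pos hwlen, hg]
    simp only []
    by_cases hc : w.getD idx ' ' = c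
    · have hlen : w.length - 1 ≠ idx := by
        have := hnc w List.mem_cons_self hc
        omega
      have hc' : (w.getD idx ' ' == c) = true := by simpa using hc
      rw [if_pos hc, if_neg hlen,
        ih (fun u hu => hall u (List.mem_cons_of_mem _ hu))
          (fun u hu => hnc u (List.mem_cons_of_mem _ hu))]
      rw [List.filter_cons]
      simp only [hc', if_true]
    · have hc' : (w.getD idx ' ' == c) = false := by simpa using hc
      rw [if_neg hc,
        ih (fun u hu => hall u (List.mem_cons_of_mem _ hu))
          (fun u hu => hnc u (List.mem_cons_of_mem _ hu))]
      rw [List.filter_cons]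
      simp only [hc', Bool.false_eq_true, if_false]

-- A's inner for-loop when the (unique) candidate ws completes this round
theorem pvRoundA_comp (get : Nat → Option Char) (M : List (List Char × Int)) (idx : Nat)
    (c : Char) (ws : List Char) (hg : get idx = some c)
    (hwc : ws.getD idx ' ' = c) (hwl : ws.length = idx + 1) :
    ∀ m : List (List Char), (∀ w ∈ m, idx < w.length) → ws ∈ m →
      (∀ w ∈ m, w.getD idx ' ' = c → w.length = idx + 1 → w = ws) →
      pvRoundA get M idx m = .inl (some ((List.lookup ws M).getD 0)) := by
  intro m
  induction m with
  | nil => intro _ h _; cases h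
  | cons w t ih =>
    intro hall hmem huniq
    have hwlen := hall w List.mem_cons_self
    rw [pvRoundA, if_pos hwlen, hg]
    simp only []
    by_cases hc : w.getD idx ' ' = c
    · by_cases hl : w.length - 1 = idx
      · have : w = ws := huniq w List.mem_cons_self hc (by omega)
        rw [if_pos hc, if_pos hl, this]
      · have hws : ws ∈ t := by
          rcases List.mem_cons.1 hmem with h | h
          · exfalso; rw [h] at hwl; exact hl (by omega)
          · exact h
        rw [if_pos hc, if_neg hl,
          ih (fun u hu => hall u (List.mem_cons_of_mem _ hu)) hws
            (fun u hu => huniq u (List.mem_cons_of_mem _ hu))]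
    · have hws : ws ∈ t := by
        rcases List.mem_cons.1 hmem with h | h
        · exfalso; rw [h] at hwc; exact hc hwc
        · exact h
      rw [if_neg hc,
        ih (fun u hu => hall u (List.mem_cons_of_mem _ hu)) hws
          (fun u hu => huniq u (List.mem_cons_of_mem _ hu))]

-- the main A-side invariant: from round idx on, A's loop computes B's scan
theorem pvLoopA_spec (get : Nat → Option Char) (M : List (List Char × Int))
    (hnd : (M.map Prod.fst).Nodup)
    (hnp : ∀ p ∈ M, ∀ q ∈ M, p.1 <+: q.1 → p.1 = q.1)
    (hlen : ∀ p ∈ M, 0 < p.1.length ∧ p.1.length ≤ 5) :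
    ∀ fuel idx, idx + fuel = 6 →
      (∀ p ∈ M, p.1.length ≤ idx → pvMatchB get p.1 0 ≠ some true) →
      pvLoopA get M fuel ((M.map Prod.fst).filter (pvSurvB get idx)) idx = pvScanB get M := by
  intro fuel
  induction fuel with
  | zero =>
    intro idx h6 hdone
    rw [pvLoopA]
    exact (pvScanB_none get M fun p hp => hdone p hp (by have := (hlen p hp).2; omega)).symm
  | succ fuel ih =>
    intro idx h6 hdone
    by_cases hm : (M.map Prod.fst).filter (pvSurvB get idx) = []
    · rw [hm, pvLoopA]
      have hr : pvRoundA get M idx [] = .inr [] := rfl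
      rw [hr]
      refine (pvScanB_none get M fun p hp hfull => ?_).symm
      by_cases hl : p.1.length ≤ idx
      · exact hdone p hp hl hfull
      · have hagree := (pvMatchB_true_iff get p.1 0).1 hfull
        have hsurv : pvSurvB get idx p.1 = true := by
          rw [pvSurvB_iff]
          exact ⟨by omega, fun j hj => by simpa using hagree j (by omega)⟩
        have : p.1 ∈ (M.map Prod.fst).filter (pvSurvB get idx) :=
          List.mem_filter.2 ⟨List.mem_map.2 ⟨p, hp, rfl⟩, hsurv⟩
        rw [hm] at this
        cases this
    · have hall : ∀ w ∈ (M.map Prod.fst).filter (pvSurvB get idx), idx < w.length := by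
        intro w hw
        exact ((pvSurvB_iff get idx w).1 (List.mem_filter.1 hw).2).1
      have hagree_of_mem : ∀ w ∈ (M.map Prod.fst).filter (pvSurvB get idx), pvAgree get w idx :=
        fun w hw => ((pvSurvB_iff get idx w).1 (List.mem_filter.1 hw).2).2
      cases hg : get idx with
      | none =>
        rw [pvLoopA, pvRoundA_none get M idx _ hall hm hg]
        refine (pvScanB_none get M fun p hp hfull => ?_).symm
        by_cases hl : p.1.length ≤ idx
        · exact hdone p hp hl hfull
        · have hagree := (pvMatchB_true_iff get p.1 0).1 hfull
          have := hagree idx (by omega)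
          rw [Nat.zero_add] at this
          rw [this] at hg
          cases hg
      | some c =>
        by_cases hcomp : ∃ w ∈ (M.map Prod.fst).filter (pvSurvB get idx),
            w.getD idx ' ' = c ∧ w.length = idx + 1
        · obtain ⟨ws, hwsm, hwsc, hwsl⟩ := hcomp
          -- candidates completing this round are all equal (they agree on every position)
          have huniq_m : ∀ w ∈ (M.map Prod.fst).filter (pvSurvB get idx),
              w.getD idx ' ' = c → w.length = idx + 1 → w = ws := by
            intro w hw hwc hwl
            apply List.ext_getElem (by omega)
            intro n hn1 hn2
            have hlt : n < idx + 1 := by omega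
            rcases Nat.lt_or_ge n idx with h | h
            · have e1 := hagree_of_mem w hw n h
              have e2 := hagree_of_mem ws hwsm n h
              rw [e1] at e2
              have : w.getD n ' ' = ws.getD n ' ' := by injection e2
              rwa [List.getD_eq_getElem _ _ hn1, List.getD_eq_getElem _ _ hn2] at this
            · have hn : n = idx := by omega
              subst hn
              rw [← List.getD_eq_getElem w ' ' hn1, ← List.getD_eq_getElem ws ' ' hn2, hwc, hwsc]
          rw [pvLoopA, pvRoundA_comp get M idx c ws hg hwsc hwsl _ hall hwsm huniq_m]
          -- ws fully matches
          have hfull : pvMatchB get ws 0 = some true := by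
            rw [pvMatchB_true_iff]
            intro j hj
            rw [Nat.zero_add]
            rcases Nat.lt_or_ge j idx with h | h
            · exact hagree_of_mem ws hwsm j h
            · have : j = idx := by omega
              subst this
              rw [hg, hwsc]
          obtain ⟨pws, hpws, hpws1⟩ := List.mem_map.1 (List.mem_filter.1 hwsm).1
          -- every full match in M is ws
          have huniq : ∀ p ∈ M, pvMatchB get p.1 0 = some true → p.1 = ws := by
            intro p hp hpfull
            by_cases hl : p.1.length ≤ idx
            · exact absurd hpfull (hdone p hp hl)
            · have hagree := (pvMatchB_true_iff get p.1 0).1 hpfull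
              have hsurv : pvSurvB get idx p.1 = true := by
                rw [pvSurvB_iff]
                exact ⟨by omega, fun j hj => by simpa using hagree j (by omega)⟩
              have hpm : p.1 ∈ (M.map Prod.fst).filter (pvSurvB get idx) :=
                List.mem_filter.2 ⟨List.mem_map.2 ⟨p, hp, rfl⟩, hsurv⟩
              have hpc : p.1.getD idx ' ' = c := by
                have := hagree idx (by omega)
                rw [Nat.zero_add, hg] at this
                injection this with h'
                exact h'.symm
              by_cases hpl : p.1.length = idx + 1
              · exact huniq_m p.1 hpm hpc hpl
              · exfalso
                have hwsfull := (pvMatchB_true_iff get ws 0).1 hfull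
                have hpre : ws <+: p.1 := by
                  apply pvPrefix_of_agree get ws p.1
                    (fun j hj => by simpa using hwsfull j hj)
                    (fun j hj => by simpa using hagree j (by omega))
                    (by omega)
                have heq := hnp pws hpws p hp (by rw [hpws1]; exact hpre)
                rw [hpws1] at heq
                rw [← heq] at hpl
                exact hpl hwsl
          have hmemp : (ws, pws.2) ∈ M := by
            have he2 : pws = (ws, pws.2) := by
              rw [← hpws1]
            rwa [he2] at hpws
          rw [pvLookupEq M hnd ws pws.2 hmemp,
            pvScanB_full get M ws pws.2 hnd hnp hmemp hfull huniq]
          rfl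
        · push_neg at hcomp
          rw [pvLoopA, pvRoundA_nocomp get M idx c hg _ hall hcomp]
          have hfilt : ((M.map Prod.fst).filter (pvSurvB get idx)).filter
              (fun w => w.getD idx ' ' == c) = (M.map Prod.fst).filter (pvSurvB get (idx + 1)) := by
            rw [List.filter_filter]
            apply List.filter_congr
            intro w hw
            rw [Bool.eq_iff_iff]
            simp only [Bool.and_eq_true, beq_iff_eq, pvSurvB_iff]
            constructor
            · rintro ⟨hwc, hidx, hag⟩
              have hwm : w ∈ (M.map Prod.fst).filter (pvSurvB get idx) :=
                List.mem_filter.2 ⟨hw, (pvSurvB_iff get idx w).2 ⟨hidx, hag⟩⟩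
              refine ⟨by have := hcomp w hwm hwc; omega, ?_⟩
              intro j hj
              rcases Nat.lt_or_ge j idx with h | h
              · exact hag j h
              · have : j = idx := by omega
                subst this
                rw [hg, hwc]
            · rintro ⟨hidx, hag⟩
              refine ⟨?_, by omega, fun j hj => hag j (by omega)⟩
              have := hag idx (by omega)
              rw [hg] at this
              injection this with h'
              exact h'.symm
          rw [hfilt]
          by_cases he : (M.map Prod.fst).filter (pvSurvB get (idx + 1)) = []
          · rw [he]
            simp only []
            rw [if_pos (show (([] : List (List Char)).isEmpty = true) from rfl)]
            refine (pvScanB_none get M fun p hp hfull => ?_).symm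
            have hagree := (pvMatchB_true_iff get p.1 0).1 hfull
            by_cases hl : p.1.length ≤ idx
            · exact hdone p hp hl hfull
            · by_cases hl1 : p.1.length = idx + 1
              · have hsurv : pvSurvB get idx p.1 = true := by
                  rw [pvSurvB_iff]
                  exact ⟨by omega, fun j hj => by simpa using hagree j (by omega)⟩
                have hpm : p.1 ∈ (M.map Prod.fst).filter (pvSurvB get idx) :=
                  List.mem_filter.2 ⟨List.mem_map.2 ⟨p, hp, rfl⟩, hsurv⟩
                have hpc : p.1.getD idx ' ' = c := by
                  have := hagree idx (by omega)
                  rw [Nat.zero_add, hg] at this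
                  injection this with h'
                  exact h'.symm
                exact hcomp p.1 hpm hpc hl1
              · have hsurv : pvSurvB get (idx + 1) p.1 = true := by
                  rw [pvSurvB_iff]
                  exact ⟨by omega, fun j hj => by simpa using hagree j (by omega)⟩
                have : p.1 ∈ (M.map Prod.fst).filter (pvSurvB get (idx + 1)) :=
                  List.mem_filter.2 ⟨List.mem_map.2 ⟨p, hp, rfl⟩, hsurv⟩
                rw [he] at this
                cases this
          · have hne : ((M.map Prod.fst).filter (pvSurvB get (idx + 1))).isEmpty = false := by
              rwa [List.isEmpty_eq_false_iff]
            simp only []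
            rw [hne]
            rw [if_neg (by simp)]
            apply ih (idx + 1) (by omega)
            intro p hp hl hfull
            have hagree := (pvMatchB_true_iff get p.1 0).1 hfull
            by_cases hl0 : p.1.length ≤ idx
            · exact hdone p hp hl0 hfull
            · have hl1 : p.1.length = idx + 1 := by omega
              have hsurv : pvSurvB get idx p.1 = true := by
                rw [pvSurvB_iff]
                exact ⟨by omega, fun j hj => by simpa using hagree j (by omega)⟩
              have hpm : p.1 ∈ (M.map Prod.fst).filter (pvSurvB get idx) :=
                List.mem_filter.2 ⟨List.mem_map.2 ⟨p, hp, rfl⟩, hsurv⟩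
              have hpc : p.1.getD idx ' ' = c := by
                have := hagree idx (by omega)
                rw [Nat.zero_add, hg] at this
                injection this with h'
                exact h'.symm
              exact hcomp p.1 hpm hpc hl1

-- A's full loop equals B's scan, for any word list without prefix relations
theorem pvCore (get : Nat → Option Char) (M : List (List Char × Int))
    (hnd : (M.map Prod.fst).Nodup)
    (hnp : ∀ p ∈ M, ∀ q ∈ M, p.1 <+: q.1 → p.1 = q.1)
    (hlen : ∀ p ∈ M, 0 < p.1.length ∧ p.1.length ≤ 5) :
    pvLoopA get M 6 (M.map Prod.fst) 0 = pvScanB get M := by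
  have hkeys : (M.map Prod.fst).filter (pvSurvB get 0) = M.map Prod.fst := by
    apply List.filter_eq_self.2
    intro w hw
    rw [pvSurvB_iff]
    obtain ⟨p, hp, hp1⟩ := List.mem_map.1 hw
    exact ⟨hp1 ▸ (hlen p hp).1, fun j hj => absurd hj (by omega)⟩
  rw [← hkeys]
  exact pvLoopA_spec get M hnd hnp hlen 6 0 rfl
    (fun p hp hl _ => by have := (hlen p hp).1; omega)

-- ===== VERDICT (by name: the statement is the Claim_ definition above) =====
theorem find_matching_digits_spec : Claim_equal_find_matching_digits := by
  intro s i reverse _ _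
  unfold Spec_find_matching_digits find_matching_digits find_matching_digits_alt
  cases h : PySem.Str.pyGet? s i with
  | none => rfl
  | some c =>
    by_cases hd : c ∈ pvDigits
    · simp [hd]
    · cases reverse
      · simpa [hd] using pvCore (fun k => PySem.List.pyGet? s.toList (i + k)) pvNumMapping
          (by decide) (by decide) (by decide)
      · simpa [hd] using pvCore (fun k => PySem.List.pyGet? s.toList (i + -(k:Int)))
          pvNumReverseMapping (by decide) (by decide) (by decide)
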